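-- pv_equiv track=rewrite | github.com/syedareehaquasar/Codeforces-solutions | evenarray.py | solution
-- ===== SOURCE A (Python) =====
-- def solution(arr, n):
--     even, odd, wo, we = 0, 0, 0, 0
--     for i in range(n):
--         if i % 2 == 0:
--             if arr[i] % 2 == 0:
--                 even += 1
--             else:
--                 we += 1
--         else:
--             if arr[i] % 2 == 0:
--                 wo += 1
--             else:
--                 odd += 1
--     if n % 2 == 0:
--         if we + odd == wo + even:
--             return we
--         return -1
--     else:
--         if we + odd + 1 == wo + even:
--             return wo
--         return -1
-- ===== SOURCE B (Python) =====
-- def solution(arr, n):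
--     # two staged passes over the strided index ranges; no i%2 tests, no counters,
--     # no n%2 case split: both of A's branch conditions reduce to we == wo and
--     # both returned values equal we there.
--     we = sum(arr[i] % 2 for i in range(0, n, 2))
--     wo = sum(1 - arr[i] % 2 for i in range(1, n, 2))
--     return we if we == wo else -1
-- ===== Notes on version B (the rewrite author's own statement) =====
-- stated objective: simpler
-- what changed: B replaces A's single indexed loop with four branch-updated counters and the n%2 case split by two staged comprehension sums over the strided ranges range(0,n,2) and range(1,n,2): we = sum of value parities at even positions, wo = count of even values at odd positions, returning we iff we == wo (A's two branch conditions both reduce to that, and both returned values equal we there).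
-- outside the precondition, e.g. on solution([], -3): A returns -1, B returns 0
import Mathlib
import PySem

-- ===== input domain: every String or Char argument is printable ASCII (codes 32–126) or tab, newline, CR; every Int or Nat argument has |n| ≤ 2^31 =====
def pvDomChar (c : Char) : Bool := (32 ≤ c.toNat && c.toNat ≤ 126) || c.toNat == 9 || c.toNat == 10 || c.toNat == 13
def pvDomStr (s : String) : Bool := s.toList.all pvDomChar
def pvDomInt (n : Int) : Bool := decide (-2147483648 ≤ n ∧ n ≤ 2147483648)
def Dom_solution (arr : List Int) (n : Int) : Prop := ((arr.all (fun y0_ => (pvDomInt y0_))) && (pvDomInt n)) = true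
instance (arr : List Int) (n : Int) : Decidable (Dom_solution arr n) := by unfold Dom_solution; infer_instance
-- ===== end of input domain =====

-- B replaces A's single indexed loop with four branch-updated counters and the n%2 case split
-- by two staged comprehension sums over the strided ranges range(0,n,2) and range(1,n,2)
-- (both of A's branch conditions reduce to we == wo; objective: simpler).

-- ===== PORT A =====
def solution (arr : List Int) (n : Int) : Int :=
  let st := (PySem.List.pyRange 0 n 1).foldl
    (fun (st : Int × Int × Int × Int) i =>
      let v := PySem.List.pyGetD arr i 0   -- arr[i]; in range under Pre_
      if PySem.Int.mod i 2 = 0 then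
        if PySem.Int.mod v 2 = 0 then (st.1 + 1, st.2.1, st.2.2.1, st.2.2.2)
        else (st.1, st.2.1, st.2.2.1, st.2.2.2 + 1)
      else
        if PySem.Int.mod v 2 = 0 then (st.1, st.2.1, st.2.2.1 + 1, st.2.2.2)
        else (st.1, st.2.1 + 1, st.2.2.1, st.2.2.2))
    (0, 0, 0, 0)
  if PySem.Int.mod n 2 = 0 then
    if st.2.2.2 + st.2.1 = st.2.2.1 + st.1 then st.2.2.2 else -1
  else
    if st.2.2.2 + st.2.1 + 1 = st.2.2.1 + st.1 then st.2.2.1 else -1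

-- ===== PORT B =====
def solution_alt (arr : List Int) (n : Int) : Int :=
  let we := ((PySem.List.pyRange 0 n 2).map
      (fun i => PySem.Int.mod (PySem.List.pyGetD arr i 0) 2)).sum   -- arr[i]; in range under Pre_
  let wo := ((PySem.List.pyRange 1 n 2).map
      (fun i => 1 - PySem.Int.mod (PySem.List.pyGetD arr i 0) 2)).sum
  if we = wo then we else -1

-- ===== PRECONDITION & SPEC =====
-- Pre_ excludes n > len(arr), where A raises IndexError, and negative n, outside the function's
-- natural domain (n is the length of the prefix to inspect), where A's -1 on odd negative n is
-- an accident of the unexecuted loop feeding the n-odd branch.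
def Pre_solution (arr : List Int) (n : Int) : Prop := 0 ≤ n ∧ n ≤ arr.length
instance (arr : List Int) (n : Int) : Decidable (Pre_solution arr n) := by unfold Pre_solution; infer_instance
def pvWitness_solution : List Int × Int := ([2, 1, 4, 7], 4)

def Spec_solution (arr : List Int) (n : Int) (out : Int) : Prop := out = solution_alt arr n
instance (arr : List Int) (n : Int) (out : Int) : Decidable (Spec_solution arr n out) := by unfold Spec_solution; infer_instance

-- ===== CLAIM (what is proved, stated in full; the proofs are below) =====
def Claim_equal_solution : Prop := ∀ (arr : List Int) (n : Int), Dom_solution arr n → Pre_solution arr n → Spec_solution arr n (solution arr n)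

-- ===== LEMMAS AND PROOFS =====

-- stepping the upper bound of a stride-2 range: the new index is appended iff its parity matches the start's
theorem pv_range2_succ (a b : Int) (hab : a ≤ b + 1) :
    PySem.List.pyRange a (b + 1) 2 = PySem.List.pyRange a b 2 ++
      (if PySem.Int.mod b 2 = PySem.Int.mod a 2 then [b] else []) := by
  rw [PySem.List.pyRange_of_pos a (b + 1) (by norm_num),
      PySem.List.pyRange_of_pos a b (by norm_num)]
  have hma := PySem.Int.mod_eq_emod_of_pos (a := a) (b := 2) (by norm_num)
  have hmb := PySem.Int.mod_eq_emod_of_pos (a := b) (b := 2) (by norm_num)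
  by_cases hp : b % 2 = a % 2
  · have hc : (if a < b + 1 then ((b + 1 - a + 2 - 1) / 2).toNat else 0)
        = (if a < b then ((b - a + 2 - 1) / 2).toNat else 0) + 1 := by
      split_ifs <;> omega
    rw [hc, List.range_succ, List.map_append]
    simp only [hmb, hp]
    simp
    split_ifs at * <;> omega
  · have hc : (if a < b + 1 then ((b + 1 - a + 2 - 1) / 2).toNat else 0)
        = (if a < b then ((b - a + 2 - 1) / 2).toNat else 0) := by
      split_ifs <;> omega
    rw [hc]
    simp [hp]

def pvStep (arr : List Int) (st : Int × Int × Int × Int) (i : Int) : Int × Int × Int × Int :=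
  let v := PySem.List.pyGetD arr i 0
  if PySem.Int.mod i 2 = 0 then
    if PySem.Int.mod v 2 = 0 then (st.1 + 1, st.2.1, st.2.2.1, st.2.2.2)
    else (st.1, st.2.1, st.2.2.1, st.2.2.2 + 1)
  else
    if PySem.Int.mod v 2 = 0 then (st.1, st.2.1, st.2.2.1 + 1, st.2.2.2)
    else (st.1, st.2.1 + 1, st.2.2.1, st.2.2.2)

def pvFold (arr : List Int) (n : Int) : Int × Int × Int × Int :=
  (PySem.List.pyRange 0 n 1).foldl (pvStep arr) (0, 0, 0, 0)

def pvS0 (arr : List Int) (n : Int) : Int :=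
  ((PySem.List.pyRange 0 n 2).map (fun i => PySem.Int.mod (PySem.List.pyGetD arr i 0) 2)).sum

def pvS1 (arr : List Int) (n : Int) : Int :=
  ((PySem.List.pyRange 1 n 2).map (fun i => 1 - PySem.Int.mod (PySem.List.pyGetD arr i 0) 2)).sum

theorem pv_invariant (arr : List Int) (k : Nat) :
    (pvFold arr (k : Int)).2.2.2 = pvS0 arr (k : Int) ∧
    (pvFold arr (k : Int)).2.2.1 = pvS1 arr (k : Int) ∧
    (pvFold arr (k : Int)).1 + (pvFold arr (k : Int)).2.2.2 = ((k : Int) + 1) / 2 ∧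
    (pvFold arr (k : Int)).2.1 + (pvFold arr (k : Int)).2.2.1 = (k : Int) / 2 := by
  induction k with
  | zero =>
    have e0 : PySem.List.pyRange 0 0 2 = [] := by decide
    have e1 : PySem.List.pyRange 1 0 2 = [] := by decide
    simp [pvFold, pvS0, pvS1, e0, e1, PySem.List.pyRange_one_eq_nil (le_refl (0 : Int))]
  | succ k ih =>
    obtain ⟨ih0, ih1, ih2, ih3⟩ := ih
    have hc : ((k + 1 : Nat) : Int) = (k : Int) + 1 := by push_cast; ring
    have hF : pvFold arr ((k : Int) + 1) = pvStep arr (pvFold arr (k : Int)) (k : Int) := by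
      simp [pvFold, PySem.List.pyRange_one_succ_right (by positivity : (0:Int) ≤ (k:Int))]
    have hS0 : pvS0 arr ((k : Int) + 1) = pvS0 arr (k : Int) +
        (if PySem.Int.mod (k : Int) 2 = 0
         then PySem.Int.mod (PySem.List.pyGetD arr (k : Int) 0) 2 else 0) := by
      unfold pvS0
      rw [pv_range2_succ 0 (k : Int) (by positivity), List.map_append, List.sum_append]
      have h0 : PySem.Int.mod (0 : Int) 2 = 0 := by decide
      rw [h0]
      split_ifs with h <;> simp
    have hS1 : pvS1 arr ((k : Int) + 1) = pvS1 arr (k : Int) +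
        (if PySem.Int.mod (k : Int) 2 = 1
         then 1 - PySem.Int.mod (PySem.List.pyGetD arr (k : Int) 0) 2 else 0) := by
      unfold pvS1
      rw [pv_range2_succ 1 (k : Int) (by omega), List.map_append, List.sum_append]
      have h1 : PySem.Int.mod (1 : Int) 2 = 1 := by decide
      rw [h1]
      split_ifs with h <;> simp
    have hm := PySem.Int.mod_eq_emod_of_pos (a := (k : Int)) (b := 2) (by norm_num)
    have hv := PySem.Int.mod_eq_emod_of_pos
      (a := PySem.List.pyGetD arr (k : Int) 0) (b := 2) (by norm_num)
    have hk2 : (k : Int) % 2 = 0 ∨ (k : Int) % 2 = 1 := by omega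
    have hv2 : PySem.List.pyGetD arr (k : Int) 0 % 2 = 0 ∨
        PySem.List.pyGetD arr (k : Int) 0 % 2 = 1 := by omega
    rw [hc, hF, hS0, hS1]
    unfold pvStep
    simp only [hm, hv]
    rcases hk2 with h1 | h1 <;> rcases hv2 with h2 | h2 <;>
      simp only [h1, h2] <;> norm_num <;>
      refine ⟨by omega, by omega, by omega, by omega⟩

-- ===== VERDICT (by name: the statement is the Claim_ definition above) =====
theorem solution_spec : Claim_equal_solution := by
  intro arr n _ hpre
  obtain ⟨h0, _⟩ := hpre
  show solution arr n = solution_alt arr n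
  show (if PySem.Int.mod n 2 = 0 then
        if (pvFold arr n).2.2.2 + (pvFold arr n).2.1 = (pvFold arr n).2.2.1 + (pvFold arr n).1
        then (pvFold arr n).2.2.2 else -1
      else
        if (pvFold arr n).2.2.2 + (pvFold arr n).2.1 + 1 = (pvFold arr n).2.2.1 + (pvFold arr n).1
        then (pvFold arr n).2.2.1 else -1)
    = (if pvS0 arr n = pvS1 arr n then pvS0 arr n else -1)
  have hk : ((n.toNat : Nat) : Int) = n := Int.toNat_of_nonneg h0
  obtain ⟨i0, i1, i2, i3⟩ := pv_invariant arr n.toNat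
  rw [hk] at i0 i1 i2 i3
  have hm := PySem.Int.mod_eq_emod_of_pos (a := n) (b := 2) (by norm_num)
  rw [hm]
  have h2 : n % 2 = 0 ∨ n % 2 = 1 := by omega
  rcases h2 with h | h <;> simp only [h] <;> split_ifs <;> omega
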